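-- pv_equiv track=rewrite | github.com/JCVelazco/OCRproject | src/DataLoader.py | truncateLabel
-- ===== SOURCE A (Python) =====
-- def truncateLabel(text, maxTxtLen):
--     # ctc loss can't compute loss if it cannot find a mapping between text label and input
--     # labels. Repeated letters cost double because of the blank symbol needing to be inserted.
--     # If a too-long label is provided, ctc returns an infinite gradient
--     cost = 0
--     for i in range(len(text)):
--         if i != 0 and text[i] == text[i-1]:
--             cost += 2
--         else:
--             cost +=1
--         if cost > maxTxtLen:
--             return(text[:i])
--     return text
-- ===== SOURCE B (Python) =====
-- def truncateLabel(text, maxTxtLen):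
--     # Run-length decomposition: a maximal run of k identical chars costs 2*k - 1
--     # (first char 1, each repeat 2). Consume whole runs while the budget allows;
--     # on the first run that doesn't fit, take the largest t with 2*t - 1 <= budget.
--     budget = maxTxtLen
--     out_len = 0
--     i = 0
--     n = len(text)
--     while i < n:
--         j = i
--         while j < n and text[j] == text[i]:
--             j += 1
--         run = j - i
--         if 2 * run - 1 <= budget:
--             budget -= 2 * run - 1
--             out_len += run
--             i = j
--         else:
--             t = (budget + 1) // 2
--             if t < 0:
--                 t = 0
--             return text[:out_len + t]
--     return text
-- ===== Notes on version B (the rewrite author's own statement) =====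
-- stated objective: alternative
-- what changed: Replaces A's per-character cost accumulation with a run-length algorithm: scan maximal runs of equal characters, charge 2k-1 per run of length k against the budget, and on the first run that does not fit take the largest t with 2t-1 <= remaining budget via integer arithmetic.
import Mathlib
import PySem

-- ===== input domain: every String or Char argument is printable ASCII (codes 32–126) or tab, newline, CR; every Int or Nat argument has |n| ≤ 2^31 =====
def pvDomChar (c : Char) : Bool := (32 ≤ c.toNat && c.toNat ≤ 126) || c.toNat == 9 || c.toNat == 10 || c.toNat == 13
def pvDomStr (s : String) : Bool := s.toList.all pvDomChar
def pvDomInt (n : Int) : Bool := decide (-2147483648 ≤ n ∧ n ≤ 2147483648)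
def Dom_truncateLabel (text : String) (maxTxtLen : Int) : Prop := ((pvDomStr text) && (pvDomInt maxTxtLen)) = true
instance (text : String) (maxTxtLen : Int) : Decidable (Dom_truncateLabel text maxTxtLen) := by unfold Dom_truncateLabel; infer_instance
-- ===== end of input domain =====

-- B replaces A's per-character early-return cost loop by a run-length decomposition
-- (a maximal run of k equal chars costs 2k-1; per-run budget arithmetic); same values (alternative).

-- ===== PORT A =====
-- A's for-loop: the i-th step knows the previous char (none at i = 0), the running cost,
-- and the prefix consumed so far (kept reversed); 'some l' = early return text[:i], 'none' = fell through.
def goA (rest : List Char) (prev : Option Char) (cost : Int) (taken : List Char) (m : Int) :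
    Option (List Char) :=
  match rest with
  | [] => none
  | c :: rs =>
    let cost' := cost + (if prev = some c then 2 else 1)
    if cost' > m then some taken.reverse
    else goA rs (some c) cost' (c :: taken) m

def truncateLabel (text : String) (maxTxtLen : Int) : String :=
  match goA text.toList none 0 [] maxTxtLen with
  | some l => String.ofList l
  | none => text

-- ===== PORT B =====
-- inner while loop of Source B: length of the maximal leading run of chars equal to c
def runLenB (c : Char) (l : List Char) : Nat := (l.takeWhile (fun d => d = c)).length

theorem runLenB_pos (c : Char) (rs : List Char) : 1 ≤ runLenB c (c :: rs) := by
  simp [runLenB, List.takeWhile]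

-- outer while loop of Source B: one iteration per run
def goB (text : String) (rest : List Char) (budget : Int) (outLen : Nat) : String :=
  match h : rest with
  | [] => text
  | c :: _ =>
    let run := runLenB c rest
    if 2 * (run : Int) - 1 ≤ budget then
      goB text (rest.drop run) (budget - (2 * (run : Int) - 1)) (outLen + run)
    else
      let t := PySem.Int.floordiv (budget + 1) 2
      let t := if t < 0 then 0 else t
      String.ofList (text.toList.take (outLen + t.toNat))
  termination_by rest.length
  decreasing_by
    rename_i tl _
    subst h
    have := runLenB_pos c tl
    simp only [List.length_drop, List.length_cons]
    omega

def truncateLabel_alt (text : String) (maxTxtLen : Int) : String :=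
  goB text text.toList maxTxtLen 0

-- ===== PRECONDITION & SPEC =====
def Spec_truncateLabel (text : String) (maxTxtLen : Int) (out : String) : Prop := out = truncateLabel_alt text maxTxtLen
instance (text : String) (maxTxtLen : Int) (out : String) : Decidable (Spec_truncateLabel text maxTxtLen out) := by unfold Spec_truncateLabel; infer_instance

-- ===== CLAIM (what is proved, stated in full; the proofs are below) =====
def Claim_equal_truncateLabel : Prop := ∀ (text : String) (maxTxtLen : Int), Dom_truncateLabel text maxTxtLen → Spec_truncateLabel text maxTxtLen (truncateLabel text maxTxtLen)

-- ===== LEMMAS AND PROOFS =====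

-- truncation point inside a run entered fresh (budget b): largest t with 2t-1 <= b
def tFresh (b : Int) : Nat := (max 0 (PySem.Int.floordiv (b + 1) 2)).toNat
-- truncation point inside a run already started (each char costs 2): largest t with 2t <= b
def tCont (b : Int) : Nat := (max 0 (PySem.Int.floordiv b 2)).toNat

-- wrap A's loop result the way truncateLabel does
def finishA (text : String) : Option (List Char) → String
  | some l => String.ofList l
  | none => text

theorem finishA_some (text : String) (l : List Char) : finishA text (some l) = String.ofList l := rfl
theorem finishA_none (text : String) : finishA text none = text := rfl

theorem fdiv2_bounds (b : Int) : PySem.Int.floordiv b 2 * 2 ≤ b ∧ b < (PySem.Int.floordiv b 2 + 1) * 2 :=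
  (PySem.Int.floordiv_eq_iff_of_pos (by norm_num)).mp rfl

theorem fdiv2_add_two (b : Int) : PySem.Int.floordiv (b + 2) 2 = PySem.Int.floordiv b 2 + 1 := by
  have h := fdiv2_bounds b
  exact (PySem.Int.floordiv_eq_iff_of_pos (by norm_num)).mpr (by omega)

theorem tCont_zero {b : Int} (hb : b ≤ 1) : tCont b = 0 := by
  have h := fdiv2_bounds b
  simp only [tCont]
  omega

theorem tFresh_zero {b : Int} (hb : b ≤ 0) : tFresh b = 0 := by
  have h := fdiv2_bounds (b + 1)
  simp only [tFresh]
  omega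

theorem tCont_step {b : Int} (hb : 2 ≤ b) : tCont b = tCont (b - 2) + 1 := by
  have h1 := fdiv2_add_two (b - 2)
  have h2 := fdiv2_bounds (b - 2)
  simp only [tCont, show b - 2 + 2 = b by ring] at *
  omega

theorem tFresh_step {b : Int} (hb : 1 ≤ b) : tFresh b = tCont (b - 1) + 1 := by
  have h1 := fdiv2_add_two (b - 1)
  have h2 := fdiv2_bounds (b - 1)
  simp only [tFresh, tCont, show b - 1 + 2 = b + 1 by ring] at *
  omega

theorem tFresh_lt {b : Int} {r : Nat} (hr : 1 ≤ r) (hb : b < 2 * (r : Int) - 1) :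
    (tFresh b : Int) < (r : Int) := by
  have h := fdiv2_bounds (b + 1)
  simp only [tFresh]
  omega

-- replicate commutes past a cons of the same element
theorem repc (n : Nat) (c : Char) (l : List Char) :
    List.replicate n c ++ (c :: l) = c :: (List.replicate n c ++ l) := by
  induction n with
  | zero => rfl
  | succ n ih => simp [List.replicate_succ, ih]

-- A's loop across (the tail of) a run: prev = some c, every char costs 2.
theorem goA_run2 (r : Nat) (hr : 1 ≤ r) (c : Char) (rest' : List Char) (cost : Int)
    (taken : List Char) (m : Int) :
    goA (List.replicate r c ++ rest') (some c) cost taken m =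
      if m < cost + 2 * (r : Int) then some (taken.reverse ++ List.replicate (tCont (m - cost)) c)
      else goA rest' (some c) (cost + 2 * (r : Int)) ((List.replicate r c).reverse ++ taken) m := by
  induction r, hr using Nat.le_induction generalizing cost taken with
  | base =>
    simp only [List.replicate_one, List.cons_append, goA, if_pos rfl, if_true]
    by_cases hm : cost + 2 > m
    · rw [if_pos (by exact hm), if_pos (by push_cast; omega)]
      rw [tCont_zero (by omega)]
      simp
    · rw [if_neg hm, if_neg (by push_cast; omega)]
      simp [List.replicate_one]
  | succ r hr ih =>
    rw [List.replicate_succ, List.cons_append]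
    simp only [goA, if_pos rfl, if_true]
    by_cases hm : cost + 2 > m
    · rw [if_pos (by exact hm), if_pos (by push_cast; omega)]
      rw [tCont_zero (by omega)]
      simp
    · rw [if_neg hm, ih (cost + 2) (c :: taken)]
      have hcond : (m < cost + 2 + 2 * (r : Int)) ↔ (m < cost + 2 * ((r : Nat) + 1 : Nat)) := by
        push_cast; omega
      by_cases hm2 : m < cost + 2 + 2 * (r : Int)
      · rw [if_pos hm2, if_pos (hcond.mp hm2)]
        rw [tCont_step (show 2 ≤ m - cost by omega)]
        rw [show m - cost - 2 = m - (cost + 2) by ring]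
        simp [repc, List.replicate_succ, List.append_assoc]
      · rw [if_neg hm2, if_neg (fun h => hm2 (hcond.mpr h))]
        have h1 : cost + 2 + 2 * (r : Int) = cost + 2 * ((r : Nat) + 1 : Nat) := by push_cast; ring
        have h2 : (List.replicate r c).reverse ++ (c :: taken) = (List.replicate (r + 1) c).reverse ++ taken := by
          simp [repc, List.replicate_succ, List.append_assoc]
        rw [h1, h2]
        simp [List.replicate_succ]

-- A's loop across a full maximal run entered fresh: first char costs 1, the rest 2 each.
theorem goA_runFull (r : Nat) (hr : 1 ≤ r) (c : Char) (rest' : List Char) (prev : Option Char)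
    (hprev : ¬ prev = some c) (cost : Int) (taken : List Char) (m : Int) :
    goA (List.replicate r c ++ rest') prev cost taken m =
      if m < cost + (2 * (r : Int) - 1) then some (taken.reverse ++ List.replicate (tFresh (m - cost)) c)
      else goA rest' (some c) (cost + (2 * (r : Int) - 1)) ((List.replicate r c).reverse ++ taken) m := by
  obtain ⟨s, rfl⟩ : ∃ s, r = s + 1 := ⟨r - 1, by omega⟩
  rw [List.replicate_succ, List.cons_append]
  simp only [goA, if_neg hprev]
  by_cases hm : cost + 1 > m
  · rw [if_pos (by exact hm), if_pos (by push_cast; omega)]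
    rw [tFresh_zero (by omega)]
    simp
  · by_cases hs : s = 0
    · subst hs
      rw [if_neg hm, if_neg (by push_cast; omega)]
      simp only [List.replicate_zero, List.nil_append]
      have h1 : cost + 1 = cost + (2 * ((0 : Nat) + 1 : Nat) - 1) := by push_cast; ring
      have h2 : (c :: taken) = (List.replicate (0 + 1) c).reverse ++ taken := by
        simp [List.replicate_succ]
      rw [h1, h2]
      simp [List.replicate_succ]
    · rw [if_neg hm, goA_run2 s (by omega) c rest' (cost + 1) (c :: taken) m]
      have hcond : (m < cost + 1 + 2 * (s : Int)) ↔ (m < cost + (2 * ((s : Nat) + 1 : Nat) - 1)) := by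
        push_cast; omega
      by_cases hm2 : m < cost + 1 + 2 * (s : Int)
      · rw [if_pos hm2, if_pos (hcond.mp hm2)]
        rw [tFresh_step (show 1 ≤ m - cost by omega)]
        rw [show m - cost - 1 = m - (cost + 1) by ring]
        simp [repc, List.replicate_succ, List.append_assoc]
      · rw [if_neg hm2, if_neg (fun h => hm2 (hcond.mpr h))]
        have h1 : cost + 1 + 2 * (s : Int) = cost + (2 * ((s : Nat) + 1 : Nat) - 1) := by
          push_cast; ring
        have h2 : (List.replicate s c).reverse ++ (c :: taken) = (List.replicate (s + 1) c).reverse ++ taken := by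
          simp [repc, List.replicate_succ, List.append_assoc]
        rw [h1, h2]
        simp [List.replicate_succ]

-- one unfolding of B's outer loop on a nonempty rest
theorem goB_cons (text : String) (c : Char) (tl : List Char) (budget : Int) (outLen : Nat) :
    goB text (c :: tl) budget outLen =
      if 2 * ((runLenB c (c :: tl) : Nat) : Int) - 1 ≤ budget then
        goB text ((c :: tl).drop (runLenB c (c :: tl)))
          (budget - (2 * ((runLenB c (c :: tl) : Nat) : Int) - 1)) (outLen + runLenB c (c :: tl))
      else
        String.ofList (text.toList.take (outLen +
          (if PySem.Int.floordiv (budget + 1) 2 < 0 then 0 else PySem.Int.floordiv (budget + 1) 2).toNat)) := by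
  rw [goB.eq_def]

-- decomposition of a list into its leading maximal run
theorem run_decomp (c : Char) (tl : List Char) :
    (c :: tl) = List.replicate (runLenB c (c :: tl)) c ++ (c :: tl).dropWhile (fun d => d = c) := by
  conv_lhs => rw [← List.takeWhile_append_dropWhile (p := fun d => d = c) (l := c :: tl)]
  congr 1
  apply List.eq_replicate_of_mem
  intro b hb
  have := List.mem_takeWhile_imp hb
  simpa using this

theorem head_dropWhile_ne (p : Char → Bool) (l : List Char) (x : Char)
    (h : (l.dropWhile p).head? = some x) : ¬ p x := by
  induction l with
  | nil => simp [List.dropWhile] at h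
  | cons a l ih =>
    by_cases hp : p a
    · rw [List.dropWhile_cons_of_pos hp] at h; exact ih h
    · rw [List.dropWhile_cons_of_neg hp] at h
      simp at h; subst h; exact hp

-- main loop correspondence: A's per-character loop = B's per-run loop
theorem goA_goB (n : Nat) : ∀ (rest : List Char), rest.length ≤ n →
    ∀ (text : String) (m cost : Int) (outLen : Nat) (taken : List Char) (prev : Option Char),
    rest = text.toList.drop outLen →
    taken.reverse = text.toList.take outLen →
    (∀ c, rest.head? = some c → ¬ prev = some c) →
    finishA text (goA rest prev cost taken m) = goB text rest (m - cost) outLen := by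
  induction n with
  | zero =>
    intro rest hlen text m cost outLen taken prev hrest htaken hprev
    have : rest = [] := List.eq_nil_of_length_eq_zero (by omega)
    subst this
    simp [goA, goB, finishA_none]
  | succ n ih =>
    intro rest hlen text m cost outLen taken prev hrest htaken hprev
    match hR : rest with
    | [] => simp [goA, goB, finishA_none]
    | c :: tl =>
      rw [goB_cons]
      set r := runLenB c (c :: tl) with hr_def
      have hr1 : 1 ≤ r := runLenB_pos c tl
      have hdecomp : (c :: tl) = List.replicate r c ++ (c :: tl).dropWhile (fun d => d = c) :=
        run_decomp c tl
      set rest' := (c :: tl).dropWhile (fun d => d = c) with hrest'_def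
      have hprevc : ¬ prev = some c := hprev c rfl
      have hlen' : rest'.length ≤ n := by
        have h := congrArg List.length hdecomp
        simp [List.length_replicate] at h hlen
        omega
      conv_lhs => rw [hdecomp]
      rw [goA_runFull r hr1 c rest' prev hprevc cost taken m]
      have hdrop : (c :: tl).drop r = rest' := by
        conv_lhs => rw [hdecomp]
        exact List.drop_left' (by simp)
      have htake : (c :: tl).take r = List.replicate r c := by
        conv_lhs => rw [hdecomp]
        exact List.take_left' (by simp)
      by_cases hfit : 2 * (r : Int) - 1 ≤ m - cost
      · -- the whole run fits: both loops advance past it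
        rw [if_neg (by omega), if_pos (by exact hfit)]
        have hrest2 : rest' = text.toList.drop (outLen + r) := by
          rw [← List.drop_drop, ← hrest, hdrop]
        have htaken2 : ((List.replicate r c).reverse ++ taken).reverse = text.toList.take (outLen + r) := by
          rw [List.take_add, ← htaken, ← hrest, htake]
          simp
        have hprev2 : ∀ d, rest'.head? = some d → ¬ (some c : Option Char) = some d := by
          intro d hd hcd
          have := head_dropWhile_ne _ _ _ hd
          simp at this hcd
          exact this hcd.symm
        rw [ih rest' hlen' text m (cost + (2 * (r : Int) - 1)) (outLen + r)
          ((List.replicate r c).reverse ++ taken) (some c) hrest2 htaken2 hprev2]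
        rw [hdrop, show m - cost - (2 * (r : Int) - 1) = m - (cost + (2 * (r : Int) - 1)) by ring]
      · -- the run does not fit: both sides truncate inside it
        rw [if_pos (by omega), if_neg (by omega), finishA_some]
        have hmax : (if PySem.Int.floordiv (m - cost + 1) 2 < 0 then 0 else PySem.Int.floordiv (m - cost + 1) 2).toNat
            = tFresh (m - cost) := by
          simp only [tFresh]
          congr 1
          omega
        rw [hmax]
        congr 1
        have htlt : (tFresh (m - cost) : Int) < (r : Int) := tFresh_lt hr1 (by omega)
        have htle : tFresh (m - cost) ≤ r := by exact_mod_cast htlt.le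
        rw [List.take_add, ← htaken, ← hrest]
        congr 1
        conv_rhs => rw [hdecomp]
        rw [List.take_append_of_le_length (by simpa using htle), List.take_replicate,
          min_eq_left htle]

-- ===== VERDICT (by name: the statement is the Claim_ definition above) =====
theorem truncateLabel_spec : Claim_equal_truncateLabel := by
  intro text m _
  unfold Spec_truncateLabel truncateLabel truncateLabel_alt
  have h := goA_goB text.toList.length text.toList le_rfl text m 0 0 [] none
    (by simp) (by simp) (by simp)
  rw [show m - 0 = m by ring] at h
  rw [← h]
  cases goA text.toList none 0 [] m <;> rfl
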